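-- pv_equiv track=rewrite | github.com/ArpadGBondor/Codewars_Solutions | Python/6 kyu/0016.py | sc
-- ===== SOURCE A (Python) =====
-- import math
-- import math
--
-- def sc(room: list[list[str]]) -> list[list[str]]:
--
--     # Flatten non-space elements
--     elements = [el for row in room for el in row if el != " "]
--     # (yep, I'm still not thinking enough in Python...)
--
--     number_of_elements = len(elements)
--     sorted_size = math.ceil(math.sqrt(number_of_elements))
--
--     rows = len(room)
--     cols = len(room[0]) if room else 0
--
--     # Create empty result grid
--     res = [[" " for _ in range(cols)] for _ in range(rows)]
--
--     # Fill first sorted_size columns row by row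
--     idx = 0
--     for i in range(rows):
--         for j in range(min(sorted_size, cols)):
--             if idx < number_of_elements:
--                 res[i][j] = elements[idx]
--                 idx += 1
--
--     return res
-- ===== SOURCE B (Python) =====
-- import math
--
-- def sc(room: list[list[str]]) -> list[list[str]]:
--     # Build each output row directly by slicing the flattened elements,
--     # instead of mutating a preallocated grid with a running index.
--     elements = [el for row in room for el in row if el != " "]
--     cols = len(room[0]) if room else 0
--     width = min(math.ceil(math.sqrt(len(elements))), cols)
--     res = []
--     for i in range(len(room)):
--         chunk = elements[i * width:(i + 1) * width]
--         res.append(chunk + [" "] * (cols - len(chunk)))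
--     return res
-- ===== Notes on version B (the rewrite author's own statement) =====
-- stated objective: simpler
-- what changed: B builds each output row directly by slicing the flattened element list (chunk + space padding), replacing A's preallocated all-space grid mutated cell-by-cell with a running index and an idx<count guard.
import Mathlib
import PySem

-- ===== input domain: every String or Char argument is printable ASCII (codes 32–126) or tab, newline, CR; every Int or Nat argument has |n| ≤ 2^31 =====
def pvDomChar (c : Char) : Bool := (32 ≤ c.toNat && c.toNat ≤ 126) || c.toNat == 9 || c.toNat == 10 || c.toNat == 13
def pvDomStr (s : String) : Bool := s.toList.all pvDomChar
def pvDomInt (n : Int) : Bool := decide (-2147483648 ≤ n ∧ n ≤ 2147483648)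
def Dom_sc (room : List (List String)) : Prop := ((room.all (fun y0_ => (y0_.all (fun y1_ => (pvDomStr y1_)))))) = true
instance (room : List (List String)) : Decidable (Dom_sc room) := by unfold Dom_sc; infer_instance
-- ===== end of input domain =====

-- B builds each output row directly by slicing the flattened non-space elements, instead of
-- mutating a preallocated all-space grid cell-by-cell with a running index (objective: simpler).

-- ===== PORT A =====
-- math.ceil(math.sqrt(n)) for a nonneg int n: the integer ceiling square root
def ceilSqrtNat (n : Nat) : Nat :=
  if Nat.sqrt n * Nat.sqrt n == n then Nat.sqrt n else Nat.sqrt n + 1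

-- A's inner loop `for j in range(min(sorted_size, cols))`, threading (idx, res);
-- `cnt` counts remaining iterations, `j` is the current column.
-- `elements[idx]` is guarded by `idx < number_of_elements`, so `getD` is exact there.
def scInner (e : List String) (n i : Nat) : Nat → Nat → Nat × List (List String) → Nat × List (List String)
  | _, 0, st => st
  | j, cnt + 1, st =>
      scInner e n i (j + 1) cnt
        (if st.1 < n then (st.1 + 1, st.2.set i ((st.2.getD i []).set j (e.getD st.1 " "))) else st)

-- A's outer loop `for i in range(rows)`
def scOuter (e : List String) (n w : Nat) : Nat → Nat → Nat × List (List String) → Nat × List (List String)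
  | _, 0, st => st
  | i, cnt + 1, st => scOuter e n w (i + 1) cnt (scInner e n i 0 w st)

def sc (room : List (List String)) : List (List String) :=
  let elements := room.flatMap (fun row => row.filter (fun el => el ≠ " "))
  let n := elements.length
  let sortedSize := ceilSqrtNat n
  let rows := room.length
  let cols := (room.headD []).length
  let res := List.replicate rows (List.replicate cols " ")
  (scOuter elements n (min sortedSize cols) 0 rows (0, res)).2

-- ===== PORT B =====
-- Source B: output row i is the slice elements[i*width:(i+1)*width] padded with spaces;
-- the slice bounds are nonnegative, so the slice is exactly drop/take.
def sc_alt (room : List (List String)) : List (List String) :=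
  let elements := room.flatMap (fun row => row.filter (fun el => el ≠ " "))
  let cols := (room.headD []).length
  let width := min (ceilSqrtNat elements.length) cols
  (List.range room.length).map (fun i =>
    let chunk := (elements.drop (i * width)).take width
    chunk ++ List.replicate (cols - chunk.length) " ")

-- ===== PRECONDITION & SPEC =====
def Spec_sc (room : List (List String)) (out : List (List String)) : Prop := out = sc_alt room
instance (room : List (List String)) (out : List (List String)) : Decidable (Spec_sc room out) := by unfold Spec_sc; infer_instance

-- ===== CLAIM (what is proved, stated in full; the proofs are below) =====
def Claim_equal_sc : Prop := ∀ (room : List (List String)), Dom_sc room → Spec_sc room (sc room)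


-- ===== LEMMAS AND PROOFS =====

-- `overwrite row xs` replaces the first `xs.length` entries of `row` by `xs`
def overwrite : List String → List String → List String
  | row, [] => row
  | [], _ :: _ => []
  | _ :: rs, x :: xs => x :: overwrite rs xs

-- `writeSeg row j xs` replaces entries j, j+1, … of `row` by the entries of `xs`
def writeSeg : List String → Nat → List String → List String
  | row, 0, xs => overwrite row xs
  | [], _ + 1, _ => []
  | r :: rs, j + 1, xs => r :: writeSeg rs j xs

lemma writeSeg_zero (row : List String) (xs : List String) :
    writeSeg row 0 xs = overwrite row xs := by
  cases row <;> cases xs <;> rfl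

lemma writeSeg_nil : ∀ (j : Nat) (row : List String), writeSeg row j [] = row := by
  intro j
  induction j with
  | zero => intro row; cases row <;> rfl
  | succ j ih => intro row; cases row with
    | nil => rfl
    | cons r rs => simp [writeSeg, ih]

lemma writeSeg_set : ∀ (j : Nat) (row : List String) (x : String) (xs : List String),
    j < row.length →
    writeSeg (row.set j x) (j + 1) xs = writeSeg row j (x :: xs) := by
  intro j
  induction j with
  | zero =>
    intro row x xs hj
    cases row with
    | nil => simp at hj
    | cons r rs => simp [writeSeg, overwrite]
  | succ j ih =>
    intro row x xs hj
    cases row with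
    | nil => simp at hj
    | cons r rs =>
      have hj' : j < rs.length := by simpa using hj
      simp [writeSeg, List.set_cons_succ, ih rs x xs hj']

lemma overwrite_replicate : ∀ (xs : List String) (cols : Nat),
    xs.length ≤ cols →
    overwrite (List.replicate cols " ") xs = xs ++ List.replicate (cols - xs.length) " " := by
  intro xs
  induction xs with
  | nil => intro cols _; simp [overwrite]
  | cons x xs ih =>
    intro cols h
    cases cols with
    | zero => simp at h
    | succ c =>
      have h' : xs.length ≤ c := by simpa using h
      simp [List.replicate_succ, overwrite, ih c h', Nat.succ_sub_succ]

lemma getD_set_self (l : List (List String)) (i : Nat) (x : List String) (h : i < l.length) :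
    (l.set i x).getD i [] = x := by
  simp [List.getD_eq_getElem?_getD, h]

lemma getD_set_ne (l : List (List String)) (i k : Nat) (x : List String) (h : i ≠ k) :
    (l.set i x).getD k [] = l.getD k [] := by
  simp [List.getD_eq_getElem?_getD, List.getElem?_set_ne h]

lemma set_getD_self (l : List (List String)) (i : Nat) (h : i < l.length) :
    l.set i (l.getD i []) = l := by
  have hg : l.getD i [] = l[i] := by
    simp [List.getD_eq_getElem?_getD, List.getElem?_eq_getElem h]
  rw [hg, List.set_getElem_self]

lemma take_set_succ (l : List (List String)) (i : Nat) (x : List String) (h : i < l.length) :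
    (l.set i x).take (i + 1) = l.take i ++ [x] := by
  rw [List.set_eq_take_append_cons_drop, if_pos h, List.take_append]
  have h1 : (l.take i).length = i := List.length_take_of_le (by omega)
  rw [List.take_of_length_le (by omega), h1]
  simp

lemma inner_spec (e : List String) (i : Nat) :
    ∀ (cnt j idx : Nat) (res : List (List String)),
      i < res.length →
      j + cnt ≤ (res.getD i []).length →
      scInner e e.length i j cnt (idx, res)
        = (idx + min cnt (e.length - idx),
           res.set i (writeSeg (res.getD i []) j
             ((e.drop idx).take (min cnt (e.length - idx))))) := by
  intro cnt
  induction cnt with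
  | zero =>
    intro j idx res hi _
    have h0 : min 0 (e.length - idx) = 0 := by omega
    simp only [scInner]
    rw [h0, List.take_zero, writeSeg_nil, set_getD_self res i hi, Nat.add_zero]
  | succ cnt ih =>
    intro j idx res hi hlen
    by_cases hlt : idx < e.length
    · have hj : j < (res.getD i []).length := by omega
      have step : scInner e e.length i j (cnt + 1) (idx, res)
          = scInner e e.length i (j + 1) cnt
              (idx + 1, res.set i ((res.getD i []).set j (e.getD idx " "))) := by
        simp [scInner, hlt]
      have hres' : i < (res.set i ((res.getD i []).set j (e.getD idx " "))).length := by
        simpa using hi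
      have hgd : (res.set i ((res.getD i []).set j (e.getD idx " "))).getD i []
          = (res.getD i []).set j (e.getD idx " ") := getD_set_self res i _ hi
      have hlen' : (j + 1) + cnt
          ≤ ((res.set i ((res.getD i []).set j (e.getD idx " "))).getD i []).length := by
        rw [hgd, List.length_set]; omega
      rw [step, ih (j + 1) (idx + 1) _ hres' hlen']
      have hm : min (cnt + 1) (e.length - idx) = min cnt (e.length - (idx + 1)) + 1 := by omega
      have hgetd : e.getD idx " " = e[idx] := by
        simp [List.getD_eq_getElem?_getD, List.getElem?_eq_getElem hlt]
      have hcons : (e.drop idx).take (min cnt (e.length - (idx + 1)) + 1)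
          = e.getD idx " " :: (e.drop (idx + 1)).take (min cnt (e.length - (idx + 1))) := by
        rw [List.drop_eq_getElem_cons hlt, List.take_succ_cons, hgetd]
      simp only [Prod.mk.injEq]
      refine ⟨by omega, ?_⟩
      rw [hgd, writeSeg_set j _ _ _ hj, List.set_set, hm, hcons]
    · have hge : e.length ≤ idx := by omega
      have step : scInner e e.length i j (cnt + 1) (idx, res)
          = scInner e e.length i (j + 1) cnt (idx, res) := by
        simp [scInner, hlt]
      rw [step, ih (j + 1) idx res hi (by omega)]
      have hz : e.length - idx = 0 := Nat.sub_eq_zero_of_le hge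
      simp only [hz, Nat.min_zero, List.take_zero, Nat.add_zero]
      rw [writeSeg_nil, writeSeg_nil, set_getD_self res i hi]

lemma outer_spec (e : List String) (cols w : Nat) (hw : w ≤ cols) :
    ∀ (cnt i : Nat) (res : List (List String)),
      i + cnt ≤ res.length →
      (∀ t, t < cnt → res.getD (i + t) [] = List.replicate cols " ") →
      (scOuter e e.length w i cnt (min (i * w) e.length, res)).2
        = res.take i
          ++ (List.range' i cnt).map (fun t =>
               (e.drop (t * w)).take w
                 ++ List.replicate (cols - ((e.drop (t * w)).take w).length) " ")
          ++ res.drop (i + cnt) := by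
  intro cnt
  induction cnt with
  | zero =>
    intro i res hlen _
    simp [scOuter, List.take_append_drop]
  | succ cnt ih =>
    intro i res hlen hrows
    have hi : i < res.length := by omega
    have hrow0 : res.getD i [] = List.replicate cols " " := by simpa using hrows 0 (by omega)
    have hinner := inner_spec e i w 0 (min (i * w) e.length) res hi
      (by rw [hrow0]; simpa using hw)
    have hidx : min (i * w) e.length + min w (e.length - min (i * w) e.length)
        = min ((i + 1) * w) e.length := by
      have h1 : (i + 1) * w = i * w + w := by ring
      omega
    have hchunk : (e.drop (min (i * w) e.length)).take (min w (e.length - min (i * w) e.length))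
        = (e.drop (i * w)).take w := by
      rcases Nat.le_total (i * w) e.length with h | h
      · rw [Nat.min_eq_left h]
        have h2 : min w (e.length - i * w) = min w (e.drop (i * w)).length := by simp
        rw [h2, ← List.take_eq_take_min]
      · have hd : e.drop (i * w) = [] := List.drop_eq_nil_of_le h
        rw [Nat.min_eq_right h]
        simp [hd]
    have hchlen : ((e.drop (i * w)).take w).length ≤ cols := by
      simp; omega
    have hrow : writeSeg (res.getD i [])  0
          ((e.drop (min (i * w) e.length)).take (min w (e.length - min (i * w) e.length)))
        = (e.drop (i * w)).take w
          ++ List.replicate (cols - ((e.drop (i * w)).take w).length) " " := by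
      rw [hchunk, hrow0, writeSeg_zero]
      exact overwrite_replicate _ cols hchlen
    have hstep : scOuter e e.length w i (cnt + 1) (min (i * w) e.length, res)
        = scOuter e e.length w (i + 1) cnt (scInner e e.length i 0 w (min (i * w) e.length, res)) := by
      simp [scOuter]
    set newrow := (e.drop (i * w)).take w
      ++ List.replicate (cols - ((e.drop (i * w)).take w).length) " " with hnew
    have hres' : (i + 1) + cnt ≤ (res.set i newrow).length := by simp; omega
    have hrows' : ∀ t, t < cnt → (res.set i newrow).getD ((i + 1) + t) [] = List.replicate cols " " := by
      intro t ht
      rw [getD_set_ne res i _ newrow (by omega)]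
      have := hrows (1 + t) (by omega)
      rwa [show i + (1 + t) = (i + 1) + t from by omega] at this
    rw [hstep, hinner, hrow, hidx]
    rw [ih (i + 1) (res.set i newrow) hres' hrows']
    rw [take_set_succ res i newrow hi, List.drop_set_of_lt (by omega : i < (i + 1) + cnt),
        List.range'_succ, List.map_cons, ← hnew]
    rw [show i + 1 + cnt = i + (cnt + 1) from by omega]
    simp only [List.append_assoc, List.singleton_append]

-- ===== VERDICT (by name: the statement is the Claim_ definition above) =====
theorem sc_spec : Claim_equal_sc := by
  intro room _
  unfold Spec_sc sc sc_alt
  dsimp only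
  set e := room.flatMap (fun row => row.filter (fun el => el ≠ " ")) with he
  set cols := (room.headD []).length with hc
  set w := min (ceilSqrtNat e.length) cols with hwdef
  have hrep : ∀ t, t < room.length →
      (List.replicate room.length (List.replicate cols " ")).getD (0 + t) [] = List.replicate cols " " := by
    intro t ht
    simp [List.getD_eq_getElem?_getD, ht]
  have hout := outer_spec e cols w (min_le_right _ _) room.length 0
      (List.replicate room.length (List.replicate cols " ")) (by simp) hrep
  rw [show min (0 * w) e.length = 0 from by simp] at hout
  rw [hout]
  simp [List.range_eq_range']
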